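-- pv_equiv track=rewrite | github.com/Shengle-Dai/Cornell-Dining-Selection | recommendation_engine.py | _is_dietary_compatible
-- ===== SOURCE A (Python) =====
-- def _is_dietary_compatible(dish_attrs: set, user_dietary: set) -> bool:
--     """Return False if the dish conflicts with the user's dietary restrictions.
--
--     Only filters when the dish has non-empty dietary_attrs — unknown dishes
--     always pass through to avoid over-filtering.
--     """
--     if not dish_attrs or not user_dietary:
--         return True
--     for restriction in user_dietary:
--         if restriction == "vegetarian" and not (dish_attrs & {"vegetarian", "vegan"}):
--             return False
--         elif restriction == "vegan" and "vegan" not in dish_attrs: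
--             return False
--         elif restriction == "gluten-free" and "gluten-free" not in dish_attrs:
--             return False
--         elif restriction == "dairy-free" and "dairy-free" not in dish_attrs:
--             return False
--         elif restriction == "halal" and "halal" not in dish_attrs:
--             return False
--         elif restriction == "no-nuts" and "contains-nuts" in dish_attrs:
--             return False
--         elif restriction == "no-shellfish" and "contains-shellfish" in dish_attrs:
--             return False
--     return True
-- ===== SOURCE B (Python) =====
-- # Attribute-driven rules: each dish attribute GRANTS some requirement
-- # restrictions (vegan grants both vegan and vegetarian) or TRIGGERS a
-- # forbid restriction (contains-nuts triggers no-nuts).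
-- _GRANTS = {
--     "vegetarian": {"vegetarian"},
--     "vegan": {"vegetarian", "vegan"},
--     "gluten-free": {"gluten-free"},
--     "dairy-free": {"dairy-free"},
--     "halal": {"halal"},
-- }
-- _TRIGGERS = {"contains-nuts": "no-nuts", "contains-shellfish": "no-shellfish"}
-- _REQUIREMENTS = {"vegetarian", "vegan", "gluten-free", "dairy-free", "halal"}
--
--
-- def _is_dietary_compatible(dish_attrs: set, user_dietary: set) -> bool:
--     if not dish_attrs or not user_dietary:
--         return True
--     # Stage 1: start from all requirement restrictions and remove the ones
--     # the dish's attributes satisfy; what is left is violated.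
--     violated = set(_REQUIREMENTS)
--     for a in dish_attrs:
--         violated -= _GRANTS.get(a, set())
--     # Stage 2: add every forbid restriction some attribute triggers.
--     for a in dish_attrs:
--         t = _TRIGGERS.get(a)
--         if t is not None:
--             violated.add(t)
--     # Compatible iff the user holds none of the violated restrictions.
--     return user_dietary.isdisjoint(violated)
-- ===== Notes on version B (the rewrite author's own statement) =====
-- stated objective: alternative
-- what changed: Inverts the traversal: instead of scanning user_dietary with a seven-branch if/elif cascade and early returns, B derives from dish_attrs alone the set of restrictions the dish violates (subtracting granted requirements, adding triggered forbids) and returns a single set-disjointness test against user_dietary.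
import Mathlib
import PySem

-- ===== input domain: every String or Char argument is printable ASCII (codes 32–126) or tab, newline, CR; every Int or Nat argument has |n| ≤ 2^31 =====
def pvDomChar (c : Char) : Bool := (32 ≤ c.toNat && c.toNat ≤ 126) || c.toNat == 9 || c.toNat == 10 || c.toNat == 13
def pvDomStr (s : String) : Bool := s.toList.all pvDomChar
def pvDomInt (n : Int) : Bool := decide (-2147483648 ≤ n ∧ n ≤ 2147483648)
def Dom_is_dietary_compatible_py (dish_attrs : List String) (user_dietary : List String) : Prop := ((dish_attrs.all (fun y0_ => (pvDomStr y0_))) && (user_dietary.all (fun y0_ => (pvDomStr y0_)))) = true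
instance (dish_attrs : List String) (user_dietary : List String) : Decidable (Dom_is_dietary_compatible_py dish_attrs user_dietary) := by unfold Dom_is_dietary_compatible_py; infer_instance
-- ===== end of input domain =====

-- B inverts the traversal: it derives from dish_attrs the set of violated restrictions
-- (subtract granted requirements, add triggered forbids) and ends with one disjointness
-- test against user_dietary, instead of A's branch cascade over user_dietary (alternative).

-- ===== PORT A =====
-- A's for-loop over user_dietary with its early returns, as structural recursion
def pvCheckA (dish : List String) : List String → Bool
  | [] => true
  | r :: rest =>
    if r == "vegetarian" && !(dish.contains "vegetarian" || dish.contains "vegan") then false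
    else if r == "vegan" && !(dish.contains "vegan") then false
    else if r == "gluten-free" && !(dish.contains "gluten-free") then false
    else if r == "dairy-free" && !(dish.contains "dairy-free") then false
    else if r == "halal" && !(dish.contains "halal") then false
    else if r == "no-nuts" && dish.contains "contains-nuts" then false
    else if r == "no-shellfish" && dish.contains "contains-shellfish" then false
    else pvCheckA dish rest

def is_dietary_compatible_py (dish_attrs : List String) (user_dietary : List String) : Bool :=
  if dish_attrs.isEmpty || user_dietary.isEmpty then true
  else pvCheckA dish_attrs user_dietary

-- ===== PORT B =====
-- Source B's module-level rule tables
def pvGrants : PySem.Dict String (PySem.Set String) :=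
  PySem.Dict.ofList [("vegetarian", PySem.Set.ofList ["vegetarian"]),
    ("vegan", PySem.Set.ofList ["vegetarian", "vegan"]),
    ("gluten-free", PySem.Set.ofList ["gluten-free"]),
    ("dairy-free", PySem.Set.ofList ["dairy-free"]),
    ("halal", PySem.Set.ofList ["halal"])]

def pvTriggers : PySem.Dict String String :=
  PySem.Dict.ofList [("contains-nuts", "no-nuts"), ("contains-shellfish", "no-shellfish")]

def pvRequirements : PySem.Set String :=
  PySem.Set.ofList ["vegetarian", "vegan", "gluten-free", "dairy-free", "halal"]

def is_dietary_compatible_py_alt (dish_attrs : List String) (user_dietary : List String) : Bool :=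
  if dish_attrs.isEmpty || user_dietary.isEmpty then true
  else
    -- stage 1: violated -= _GRANTS.get(a, set()) for each dish attribute
    let v1 := dish_attrs.foldl
      (fun v a => PySem.Set.diff v (pvGrants.getD a PySem.Set.empty)) pvRequirements
    -- stage 2: violated.add(_TRIGGERS[a]) where present
    let v2 := dish_attrs.foldl
      (fun v a => match pvTriggers.get? a with
        | some t => PySem.Set.add v t
        | none => v) v1
    PySem.Set.isdisjoint user_dietary v2

-- ===== PRECONDITION & SPEC =====
def Spec_is_dietary_compatible_py (dish_attrs : List String) (user_dietary : List String) (out : Bool) : Prop := out = is_dietary_compatible_py_alt dish_attrs user_dietary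
instance (dish_attrs : List String) (user_dietary : List String) (out : Bool) : Decidable (Spec_is_dietary_compatible_py dish_attrs user_dietary out) := by unfold Spec_is_dietary_compatible_py; infer_instance

-- ===== CLAIM (what is proved, stated in full; the proofs are below) =====
def Claim_equal_is_dietary_compatible_py : Prop := ∀ (dish_attrs : List String) (user_dietary : List String), Dom_is_dietary_compatible_py dish_attrs user_dietary → Spec_is_dietary_compatible_py dish_attrs user_dietary (is_dietary_compatible_py dish_attrs user_dietary)

-- ===== LEMMAS AND PROOFS =====
-- A's per-restriction conflict condition, as one boolean
def pvBad (dish : List String) (r : String) : Bool :=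
  (r == "vegetarian" && !(dish.contains "vegetarian" || dish.contains "vegan")) ||
  (r == "vegan" && !(dish.contains "vegan")) ||
  (r == "gluten-free" && !(dish.contains "gluten-free")) ||
  (r == "dairy-free" && !(dish.contains "dairy-free")) ||
  (r == "halal" && !(dish.contains "halal")) ||
  (r == "no-nuts" && dish.contains "contains-nuts") ||
  (r == "no-shellfish" && dish.contains "contains-shellfish")

set_option maxHeartbeats 1000000 in
theorem pvCheckA_eq_all (dish : List String) (ud : List String) :
    pvCheckA dish ud = ud.all (fun r => !pvBad dish r) := by
  induction ud with
  | nil => rfl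
  | cons r rest ih =>
    rw [pvCheckA]
    split_ifs with h1 h2 h3 h4 h5 h6 h7 <;> simp_all [pvBad] <;> tauto

theorem pvAnyCongr (l : List String) (f g : String → Bool) (h : ∀ a ∈ l, f a = g a) :
    l.any f = l.any g := by
  induction l with
  | nil => rfl
  | cons x xs ih => simp_all

theorem pv_contains_diff (s t : PySem.Set String) (r : String) :
    PySem.Set.contains (PySem.Set.diff s t) r
      = (PySem.Set.contains s r && !PySem.Set.contains t r) := by
  simp [PySem.Set.diff, PySem.Set.contains, List.contains_eq_mem, List.mem_filter]

theorem pv_contains_add (s : PySem.Set String) (t r : String) :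
    PySem.Set.contains (PySem.Set.add s t) r = (PySem.Set.contains s r || t == r) := by
  unfold PySem.Set.add
  split
  · rename_i h
    by_cases ht : t = r
    · subst ht; simp_all [PySem.Set.contains]
    · simp [beq_iff_eq, ht]
  · by_cases ht : r = t
    · simp [PySem.Set.contains, ht]
    · simp [PySem.Set.contains, ht, beq_iff_eq]
      exact fun h => absurd h.symm ht

theorem pvGrants_get? (a : String) :
    pvGrants.get? a =
      if a = "vegetarian" then some ["vegetarian"]
      else if a = "vegan" then some ["vegetarian", "vegan"]
      else if a = "gluten-free" then some ["gluten-free"]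
      else if a = "dairy-free" then some ["dairy-free"]
      else if a = "halal" then some ["halal"]
      else none := by
  split_ifs with h1 h2 h3 h4 h5
  · subst h1; rfl
  · subst h2; rfl
  · subst h3; rfl
  · subst h4; rfl
  · subst h5; rfl
  · rw [PySem.Dict.get?_eq_none_iff_not_mem_keys]
    rw [show pvGrants.keys = ["vegetarian", "vegan", "gluten-free", "dairy-free", "halal"] from rfl]
    simp [h1, h2, h3, h4, h5]

theorem pvTriggers_get? (a : String) :
    pvTriggers.get? a =
      if a = "contains-nuts" then some "no-nuts"
      else if a = "contains-shellfish" then some "no-shellfish"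
      else none := by
  split_ifs with h1 h2
  · subst h1; rfl
  · subst h2; rfl
  · rw [PySem.Dict.get?_eq_none_iff_not_mem_keys]
    rw [show pvTriggers.keys = ["contains-nuts", "contains-shellfish"] from rfl]
    simp [h1, h2]

-- stage 1 membership: r survives iff it was in s and no attribute grants it
theorem pvStage1_contains (dish : List String) (s : PySem.Set String) (r : String) :
    PySem.Set.contains
        (dish.foldl (fun v a => PySem.Set.diff v (pvGrants.getD a PySem.Set.empty)) s) r =
      (PySem.Set.contains s r &&
        !dish.any (fun a => PySem.Set.contains (pvGrants.getD a PySem.Set.empty) r)) := by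
  induction dish generalizing s with
  | nil => simp
  | cons a rest ih =>
    rw [List.foldl_cons, ih, pv_contains_diff]
    simp [Bool.and_assoc]

-- stage 2 membership: r is present iff it was in s or some attribute triggers it
theorem pvStage2_contains (dish : List String) (s : PySem.Set String) (r : String) :
    PySem.Set.contains
        (dish.foldl (fun v a => match pvTriggers.get? a with
          | some t => PySem.Set.add v t
          | none => v) s) r =
      (PySem.Set.contains s r ||
        dish.any (fun a => pvTriggers.get? a == some r)) := by
  induction dish generalizing s with
  | nil => simp
  | cons a rest ih =>
    rw [List.foldl_cons]
    cases h : pvTriggers.get? a with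
    | none =>
      simp only [h]
      rw [ih]
      simp [h]
    | some t =>
      simp only [h, List.any_cons, ih, pv_contains_add]
      by_cases ht : t = r <;> simp [ht, Bool.or_assoc, Bool.or_comm, Bool.or_left_comm]

-- the violated set's membership coincides with A's conflict condition
theorem pvViolated_contains (dish : List String) (r : String) :
    PySem.Set.contains
        (dish.foldl (fun v a => match pvTriggers.get? a with
          | some t => PySem.Set.add v t
          | none => v)
          (dish.foldl (fun v a => PySem.Set.diff v (pvGrants.getD a PySem.Set.empty))
            pvRequirements)) r =
      pvBad dish r := by
  rw [pvStage2_contains, pvStage1_contains]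
  have hgrant : ∀ a ∈ dish, PySem.Set.contains (pvGrants.getD a PySem.Set.empty) r
      = ((a == "vegetarian" || a == "vegan") && r == "vegetarian"
        || (a == "vegan" && r == "vegan")
        || (a == "gluten-free" && r == "gluten-free")
        || (a == "dairy-free" && r == "dairy-free")
        || (a == "halal" && r == "halal")) := by
    intro a _
    unfold PySem.Dict.getD
    rw [pvGrants_get? a]
    split_ifs with h1 h2 h3 h4 h5
    · subst h1
      rw [Bool.eq_iff_iff]
      simp [PySem.Set.contains, List.contains_eq_mem, PySem.Set.ofList, PySem.Set.add]
    · subst h2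
      rw [Bool.eq_iff_iff]
      simp [PySem.Set.contains, List.contains_eq_mem, PySem.Set.ofList, PySem.Set.add]
    · subst h3
      rw [Bool.eq_iff_iff]
      simp [PySem.Set.contains, List.contains_eq_mem, PySem.Set.ofList, PySem.Set.add]
    · subst h4
      rw [Bool.eq_iff_iff]
      simp [PySem.Set.contains, List.contains_eq_mem, PySem.Set.ofList, PySem.Set.add]
    · subst h5
      rw [Bool.eq_iff_iff]
      simp [PySem.Set.contains, List.contains_eq_mem, PySem.Set.ofList, PySem.Set.add]
    · rw [Bool.eq_iff_iff]
      simp [h1, h2, h3, h4, h5, PySem.Set.contains, List.contains_eq_mem, PySem.Set.empty]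
  have htrig : ∀ a ∈ dish, (pvTriggers.get? a == some r)
      = (a == "contains-nuts" && r == "no-nuts"
        || a == "contains-shellfish" && r == "no-shellfish") := by
    intro a _
    rw [pvTriggers_get? a]
    split_ifs with h1 h2
    · subst h1
      rw [Bool.eq_iff_iff]
      simp
      exact eq_comm
    · subst h2
      rw [Bool.eq_iff_iff]
      simp
      exact eq_comm
    · rw [Bool.eq_iff_iff]
      simp [h1, h2]
  rw [pvAnyCongr _ _ _ hgrant, pvAnyCongr _ _ _ htrig]
  rw [Bool.eq_iff_iff]
  by_cases hr1 : r = "vegetarian"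
  · subst hr1
    simp [pvBad, pvRequirements, PySem.Set.contains, PySem.Set.ofList, PySem.Set.add,
      List.any_eq_true, List.contains_eq_mem]
    constructor
    · intro h
      exact ⟨fun hm => (h _ hm).1 rfl, fun hm => (h _ hm).2 rfl⟩
    · rintro ⟨ha, hb⟩ x hx
      exact ⟨fun e => ha (e ▸ hx), fun e => hb (e ▸ hx)⟩
  by_cases hr2 : r = "vegan"
  · subst hr2
    simp [pvBad, pvRequirements, PySem.Set.contains, PySem.Set.ofList, PySem.Set.add,
      List.any_eq_true, List.contains_eq_mem]
    exact ⟨fun h hm => h _ hm rfl, fun h x hx e => h (e ▸ hx)⟩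
  by_cases hr3 : r = "gluten-free"
  · subst hr3
    simp [pvBad, pvRequirements, PySem.Set.contains, PySem.Set.ofList, PySem.Set.add,
      List.any_eq_true, List.contains_eq_mem]
    exact ⟨fun h hm => h _ hm rfl, fun h x hx e => h (e ▸ hx)⟩
  by_cases hr4 : r = "dairy-free"
  · subst hr4
    simp [pvBad, pvRequirements, PySem.Set.contains, PySem.Set.ofList, PySem.Set.add,
      List.any_eq_true, List.contains_eq_mem]
    exact ⟨fun h hm => h _ hm rfl, fun h x hx e => h (e ▸ hx)⟩
  by_cases hr5 : r = "halal"
  · subst hr5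
    simp [pvBad, pvRequirements, PySem.Set.contains, PySem.Set.ofList, PySem.Set.add,
      List.any_eq_true, List.contains_eq_mem]
    exact ⟨fun h hm => h _ hm rfl, fun h x hx e => h (e ▸ hx)⟩
  by_cases hr6 : r = "no-nuts"
  · subst hr6
    simp [pvBad, pvRequirements, PySem.Set.contains, PySem.Set.ofList, PySem.Set.add,
      List.any_eq_true, List.contains_eq_mem]
  by_cases hr7 : r = "no-shellfish"
  · subst hr7
    simp [pvBad, pvRequirements, PySem.Set.contains, PySem.Set.ofList, PySem.Set.add,
      List.any_eq_true, List.contains_eq_mem]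
  · simp [pvBad, hr1, hr2, hr3, hr4, hr5, hr6, hr7, pvRequirements,
      PySem.Set.contains, PySem.Set.ofList, PySem.Set.add,
      List.any_eq_true, List.contains_eq_mem]

-- ===== VERDICT (by name: the statement is the Claim_ definition above) =====
theorem is_dietary_compatible_py_spec : Claim_equal_is_dietary_compatible_py := by
  intro dish ud _
  unfold Spec_is_dietary_compatible_py is_dietary_compatible_py is_dietary_compatible_py_alt
  split
  · rfl
  · rw [pvCheckA_eq_all]
    simp only [PySem.Set.isdisjoint]
    rw [pvAnyCongr ud _ _ (fun r _ => by
      rw [show (PySem.Set.contains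
        (dish.foldl (fun v a => match pvTriggers.get? a with
          | some t => PySem.Set.add v t
          | none => v)
          (dish.foldl (fun v a => PySem.Set.diff v (pvGrants.getD a PySem.Set.empty))
            pvRequirements)) r) = pvBad dish r from pvViolated_contains dish r])]
    simp [List.all_eq_not_any_not]
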